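-- pv_equiv track=rewrite | github.com/KevinJuwangLee/LeetCode | Biweekly/70/problem4.py | numberOfWays
-- ===== SOURCE A (Python) =====
-- def numberOfWays(corridor: str) -> int:
--     s=[i for i in range(len(corridor)) if corridor[i]=="S"]
--     if len(s)%2 or len(s)==0:
--         return 0
--     t=[s[2*r+2]-s[2*r+1] for r in range(len(s)//2-1)]
--     p=1
--     for i in t:
--         p*=i
--     return p%(10**9+7)
-- ===== SOURCE B (Python) =====
-- def numberOfWays(corridor: str) -> int:
--     # Dynamic program over the corridor: track the number of ways to divide the
--     # prefix such that the current (open) segment contains 0, 1 or 2 seats.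
--     # A seat after a full segment forces a cut; a plant after a full segment
--     # offers a choice of cutting there or not.  Answer: ways ending with a
--     # segment of exactly two seats.
--     s0, s1, s2 = 1, 0, 0
--     for ch in corridor:
--         if ch == "S":
--             s0, s1, s2 = 0, s0 + s2, s1
--         else:
--             s0 = s0 + s2
--     return s2 % (10**9 + 7)
-- ===== Notes on version B (the rewrite author's own statement) =====
-- stated objective: alternative
-- what changed: Replaced the gap-product computation over collected seat indices by a 3-state dynamic program over the corridor (ways with 0/1/2 seats in the current open segment), counting divider placements directly with no index lists or gap arithmetic.
import Mathlib
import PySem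

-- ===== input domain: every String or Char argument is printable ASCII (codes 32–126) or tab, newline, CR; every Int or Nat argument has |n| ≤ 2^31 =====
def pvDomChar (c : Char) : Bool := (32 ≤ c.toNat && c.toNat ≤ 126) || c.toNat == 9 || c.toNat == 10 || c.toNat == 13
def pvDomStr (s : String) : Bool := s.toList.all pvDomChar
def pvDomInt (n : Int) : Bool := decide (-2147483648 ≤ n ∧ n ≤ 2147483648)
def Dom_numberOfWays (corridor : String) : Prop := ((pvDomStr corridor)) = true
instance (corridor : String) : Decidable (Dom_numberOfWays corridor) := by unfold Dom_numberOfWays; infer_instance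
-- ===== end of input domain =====

-- B replaces A's gap-product over collected seat indices by a 3-state dynamic
-- program over the corridor counting divider placements directly; same O(n) cost.

-- ===== PORT A =====
-- literal port of A; the pyGetD defaults are never used: the guard makes every index 2r+2, 2r+1 in range
def numberOfWays (corridor : String) : Int :=
  let s : List Int :=
    (PySem.List.pyRange 0 (PySem.Str.len corridor) 1).filter
      (fun i => PySem.Str.pyGet? corridor i == some 'S')
  if PySem.Int.mod (s.length : Int) 2 ≠ 0 ∨ s.length = 0 then 0
  else
    let t : List Int :=
      (PySem.List.pyRange 0 (PySem.Int.floordiv (s.length : Int) 2 - 1) 1).map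
        (fun r => PySem.List.pyGetD s (2 * r + 2) 0 - PySem.List.pyGetD s (2 * r + 1) 0)
    let p : Int := t.foldl (fun p i => p * i) 1
    PySem.Int.mod p (10 ^ 9 + 7)

-- ===== PORT B =====
-- state (s0, s1, s2) = number of ways for the processed prefix whose current
-- open segment holds 0 / 1 / 2 seats
def numberOfWays_alt (corridor : String) : Int :=
  let st : Int × Int × Int :=
    corridor.toList.foldl
      (fun (st : Int × Int × Int) ch =>
        if ch == 'S' then (0, st.1 + st.2.2, st.2.1)
        else (st.1 + st.2.2, st.2.1, st.2.2))
      (1, 0, 0)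
  PySem.Int.mod st.2.2 (10 ^ 9 + 7)

-- ===== PRECONDITION & SPEC =====
def Spec_numberOfWays (corridor : String) (out : Int) : Prop := out = numberOfWays_alt corridor
instance (corridor : String) (out : Int) : Decidable (Spec_numberOfWays corridor out) := by unfold Spec_numberOfWays; infer_instance

-- ===== CLAIM =====
def Claim_equal_numberOfWays : Prop := ∀ (corridor : String), Dom_numberOfWays corridor → Spec_numberOfWays corridor (numberOfWays corridor)

-- ===== LEMMAS AND PROOFS =====

-- B's loop step, named for the proofs
def pvStep (st : Int × Int × Int) (ch : Char) : Int × Int × Int :=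
  if ch == 'S' then (0, st.1 + st.2.2, st.2.1)
  else (st.1 + st.2.2, st.2.1, st.2.2)

-- linear coefficients of B's DP: pvUVC L = (u, v, c) such that the final s2 of a
-- run over L from (d,0,x) is d*u + x*v and from (0,y,0) is y*c
def pvUVC : List Char → Int × Int × Int
  | [] => (0, 1, 0)
  | ch :: L =>
    let r := pvUVC L
    if ch = 'S' then (r.2.2, r.2.2, r.2.1) else (r.1, r.1 + r.2.1, r.2.2)

-- the gap product both programs compute, as a recursion on the S-index list
def pvHprod (pv : Int) : List Int → Int
  | x :: y :: rest => (x - pv) * pvHprod y rest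
  | _ => 1

lemma pvUVC_cons (ch : Char) (L : List Char) :
    pvUVC (ch :: L) =
      if ch = 'S' then ((pvUVC L).2.2, (pvUVC L).2.2, (pvUVC L).2.1)
      else ((pvUVC L).1, (pvUVC L).1 + (pvUVC L).2.1, (pvUVC L).2.2) := rfl

lemma pvLin : ∀ (L : List Char),
    (∀ d x : Int, (L.foldl pvStep (d, 0, x)).2.2 = d * (pvUVC L).1 + x * (pvUVC L).2.1) ∧
    (∀ y : Int, (L.foldl pvStep (0, y, 0)).2.2 = y * (pvUVC L).2.2) := by
  intro L
  induction L with
  | nil => exact ⟨by intro d x; simp [pvUVC], by intro y; simp [pvUVC]⟩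
  | cons ch L ih =>
    refine ⟨?_, ?_⟩
    · intro d x
      by_cases h : ch = 'S'
      · simp only [List.foldl_cons, pvStep, h, beq_self_eq_true, if_true, pvUVC_cons]
        rw [ih.2 (d + x)]; ring
      · simp only [List.foldl_cons, pvStep, beq_iff_eq, if_neg h, pvUVC_cons]
        rw [show ((d + x, (0 : Int), x) : Int × Int × Int) = (d + x, 0, x) from rfl, ih.1 (d + x) x]
        ring
    · intro y
      by_cases h : ch = 'S'
      · simp only [List.foldl_cons, pvStep, h, beq_self_eq_true, if_true, pvUVC_cons]
        rw [show ((0 : Int), (0 : Int) + (0 : Int), y) = ((0 : Int), (0 : Int), y) from rfl,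
          ih.1 0 y]
        ring
      · simp only [List.foldl_cons, pvStep, beq_iff_eq, if_neg h, pvUVC_cons]
        rw [show ((0 : Int) + (0 : Int), y, (0 : Int)) = ((0 : Int), y, (0 : Int)) from rfl,
          ih.2 y]

-- every entry of enumerate is (index, character at that index)
lemma enum_mem : ∀ (L : List Char) (j : Nat) (e : Int × Char),
    e ∈ PySem.List.enumerate L (j : Int) → ∃ m : Nat, e.1 = ((j + m : Nat) : Int) ∧ L[m]? = some e.2 := by
  intro L
  induction L with
  | nil => intro j e h; simp [PySem.List.enumerate_nil] at h
  | cons c L ih =>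
    intro j e h
    rw [PySem.List.enumerate_cons] at h
    rcases List.mem_cons.mp h with h | h
    · exact ⟨0, by simp [h]⟩
    · have h' : e ∈ PySem.List.enumerate L ((j + 1 : Nat) : Int) := by
        have he : ((j : Int) + 1) = ((j + 1 : Nat) : Int) := by push_cast; ring
        rwa [he] at h
      obtain ⟨m, hm1, hm2⟩ := ih (j + 1) e h'
      refine ⟨m + 1, ?_, ?_⟩
      · rw [hm1]; congr 1; omega
      · simpa using hm2

-- A's filtered index list is the fst-projection of the filtered enumeration
lemma sA_eq (corridor : String) :
    (PySem.List.pyRange 0 (PySem.Str.len corridor) 1).filter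
        (fun i => PySem.Str.pyGet? corridor i == some 'S') =
      ((PySem.List.enumerate corridor.toList 0).filter
        (fun e => e.2 == 'S')).map (fun e => e.1) := by
  have h0 : PySem.List.pyRange 0 (PySem.Str.len corridor) 1 =
      (PySem.List.enumerate corridor.toList 0).map (fun e => e.1) := by
    rw [PySem.List.map_fst_enumerate, PySem.Str.len_eq]
    norm_num
  rw [h0, List.filter_map]
  congr 1
  apply List.filter_congr
  intro e he
  obtain ⟨m, hm1, hm2⟩ := enum_mem corridor.toList 0 e (by simpa using he)
  simp only [Function.comp, hm1]
  have hg : PySem.Str.pyGet? corridor ((0 + m : Nat) : Int) = corridor.toList[m]? := by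
    rw [show ((0 + m : Nat) : Int) = ((m : Nat) : Int) by omega]
    exact PySem.Str.pyGet?_natCast corridor m
  rw [hg, hm2]
  by_cases hS : e.2 = 'S' <;> simp [hS]

-- the S-index list of a suffix starting at position j
def pvS (L : List Char) (j : Int) : List Int :=
  ((PySem.List.enumerate L j).filter (fun e => e.2 == 'S')).map (fun e => e.1)

lemma pvS_cons (ch : Char) (L : List Char) (j : Int) :
    pvS (ch :: L) j = if ch = 'S' then j :: pvS L (j + 1) else pvS L (j + 1) := by
  by_cases h : ch = 'S' <;> simp [pvS, PySem.List.enumerate_cons, h]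

-- characterization of the DP coefficients in terms of the S-index list
lemma pvUVC_char : ∀ (L : List Char) (j : Int),
    (pvUVC L).1 = (if (pvS L j).length % 2 = 0 ∧ (pvS L j) ≠ [] then
        pvHprod ((pvS L j).getD 1 0) ((pvS L j).drop 2) else 0) ∧
    (pvUVC L).2.1 = (if (pvS L j).length % 2 = 0 then pvHprod (j - 1) (pvS L j) else 0) ∧
    (pvUVC L).2.2 = (if (pvS L j).length % 2 = 1 then
        pvHprod ((pvS L j).getD 0 0) ((pvS L j).drop 1) else 0) := by
  intro L
  induction L with
  | nil => intro j; simp [pvS, PySem.List.enumerate_nil, pvUVC, pvHprod]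
  | cons ch L ih =>
    intro j
    obtain ⟨ihu, ihv, ihc⟩ := ih (j + 1)
    by_cases h : ch = 'S'
    · rw [pvUVC_cons, if_pos h]
      rw [pvS_cons, if_pos h]
      refine ⟨?_, ?_, ?_⟩
      · -- u(S::L) = c(L)
        rw [ihc]
        by_cases hp : (pvS L (j + 1)).length % 2 = 1
        · rw [if_pos hp, if_pos (by simp [List.length_cons]; omega)]
          simp
        · rw [if_neg hp, if_neg (by simp [List.length_cons]; omega)]
      · -- v(S::L) = c(L)
        rw [ihc]
        match hs' : pvS L (j + 1) with
        | [] => simp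
        | a :: rest =>
          by_cases hp : (a :: rest).length % 2 = 1
          · rw [if_pos hp, if_pos (by simp [List.length_cons] at hp ⊢; omega)]
            simp [pvHprod]
          · rw [if_neg hp, if_neg (by simp [List.length_cons] at hp ⊢; omega)]
      · -- c(S::L) = v(L)
        rw [ihv]
        by_cases hp : (pvS L (j + 1)).length % 2 = 0
        · rw [if_pos hp, if_pos (by simp [List.length_cons]; omega)]
          simp [show j + 1 - 1 = j by ring]
        · rw [if_neg hp, if_neg (by simp [List.length_cons]; omega)]
    · rw [pvUVC_cons, if_neg h]
      rw [pvS_cons, if_neg h]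
      refine ⟨ihu, ?_, ihc⟩
      -- v(P::L) = u(L) + v(L)
      rw [ihu, ihv]
      match hs' : pvS L (j + 1) with
      | [] => simp [pvHprod]
      | [a] =>
        rw [if_neg (by simp), if_neg (by simp), if_neg (by simp)]
        simp
      | a :: b :: rest =>
        by_cases hp : (a :: b :: rest).length % 2 = 0
        · rw [if_pos ⟨hp, by simp⟩, if_pos hp, if_pos hp]
          simp [pvHprod, show j + 1 - 1 = j by ring]
          ring
        · rw [if_neg (fun hc => hp hc.1), if_neg hp, if_neg hp]
          simp

-- A's gap-list product over Nat-range indices equals pvHprod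
lemma gap_prod : ∀ (k : Nat) (s : List Int) (a b : Int), s.length = 2 * k →
    List.foldl (fun p i => p * i) 1
      ((List.range k).map (fun r =>
        (a :: b :: s).getD (2 * r + 2) 0 - (a :: b :: s).getD (2 * r + 1) 0)) =
      pvHprod b s := by
  intro k
  induction k with
  | zero =>
    intro s a b hlen
    have hnil : s = [] := List.length_eq_zero_iff.mp (by omega)
    subst hnil
    simp [pvHprod]
  | succ k ih =>
    intro s a b hlen
    match s with
    | x :: y :: rest =>
      have hrest : rest.length = 2 * k := by simp at hlen; omega
      rw [List.range_succ_eq_map, List.map_cons, List.foldl_cons]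
      have hmap : (List.map Nat.succ (List.range k)).map (fun r =>
            (a :: b :: x :: y :: rest).getD (2 * r + 2) 0 -
            (a :: b :: x :: y :: rest).getD (2 * r + 1) 0) =
          (List.range k).map (fun r =>
            (x :: y :: rest).getD (2 * r + 2) 0 - (x :: y :: rest).getD (2 * r + 1) 0) := by
        rw [List.map_map]
        apply List.map_congr_left
        intro r _
        simp [Nat.succ_eq_add_one, Nat.mul_add, List.getD]
      rw [hmap]
      have pull : ∀ (l : List Int) (a0 : Int),
          l.foldl (fun p i => p * i) a0 = a0 * l.foldl (fun p i => p * i) 1 := by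
        intro l
        induction l with
        | nil => intro a0; simp
        | cons z l ihl => intro a0; simp only [List.foldl_cons]; rw [ihl, ihl (1 * z)]; ring
      rw [pull]
      rw [ih rest x y hrest]
      simp [pvHprod, List.getD]

-- ===== VERDICT =====
theorem numberOfWays_spec : Claim_equal_numberOfWays := by
  intro corridor _
  unfold Spec_numberOfWays numberOfWays numberOfWays_alt
  have hfold : corridor.toList.foldl
      (fun (st : Int × Int × Int) ch =>
        if ch == 'S' then (0, st.1 + st.2.2, st.2.1)
        else (st.1 + st.2.2, st.2.1, st.2.2)) (1, 0, 0) =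
      corridor.toList.foldl pvStep (1, 0, 0) := rfl
  have hu : (corridor.toList.foldl pvStep (1, 0, 0)).2.2 = (pvUVC corridor.toList).1 := by
    have h := (pvLin corridor.toList).1 1 0
    rw [h]; ring
  have hchar := (pvUVC_char corridor.toList 0).1
  have hs0 : pvS corridor.toList 0 =
      (PySem.List.pyRange 0 (PySem.Str.len corridor) 1).filter
        (fun i => PySem.Str.pyGet? corridor i == some 'S') := (sA_eq corridor).symm
  simp only [hfold, hu, hchar, hs0]
  set s : List Int := (PySem.List.pyRange 0 (PySem.Str.len corridor) 1).filter
      (fun i => PySem.Str.pyGet? corridor i == some 'S') with hs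
  have hmod : PySem.Int.mod (s.length : Int) 2 = ((s.length % 2 : Nat) : Int) := by
    exact_mod_cast PySem.Int.mod_natCast s.length 2
  by_cases hodd : s.length % 2 = 1
  · rw [if_pos (by rw [hmod]; left; simp [hodd])]
    rw [if_neg (by simp [hodd])]
    rw [PySem.Int.mod_eq_emod_of_pos (by norm_num)]
    norm_num
  · have hev : s.length % 2 = 0 := by omega
    by_cases hnil : s.length = 0
    · rw [if_pos (by right; exact hnil)]
      rw [if_neg (by simp [List.length_eq_zero_iff.mp hnil])]
      rw [PySem.Int.mod_eq_emod_of_pos (by norm_num)]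
      norm_num
    · rw [if_neg (show ¬(PySem.Int.mod (s.length : Int) 2 ≠ 0 ∨ s.length = 0) by
        rw [hmod, hev]; simp [hnil])]
      rw [if_pos ⟨hev, by intro hc; exact hnil (by rw [hc]; rfl)⟩]
      obtain ⟨k, hk⟩ : ∃ k, s.length = 2 * k + 2 := ⟨s.length / 2 - 1, by omega⟩
      match hm : s with
      | a :: b :: rest =>
        have hrest : rest.length = 2 * k := by simp at hk; omega
        congr 1
        have hdiv : PySem.Int.floordiv ((a :: b :: rest).length : Int) 2 - 1 = (k : Int) := by
          have h1 : PySem.Int.floordiv (((a :: b :: rest).length : Nat) : Int) ((2 : Nat) : Int) =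
              (((a :: b :: rest).length / 2 : Nat) : Int) :=
            PySem.Int.floordiv_natCast _ 2
          rw [show ((2 : Nat) : Int) = 2 by norm_num] at h1
          rw [h1]
          have h2 : (a :: b :: rest).length / 2 = k + 1 := by simp at hk ⊢; omega
          rw [h2]; push_cast; ring
        rw [hdiv, PySem.List.pyRange_zero_nat, List.map_map]
        have hm2 : (List.range k).map ((fun r =>
              PySem.List.pyGetD (a :: b :: rest) (2 * r + 2) 0 -
              PySem.List.pyGetD (a :: b :: rest) (2 * r + 1) 0) ∘ (fun (m : Nat) => (m : Int))) =
            (List.range k).map (fun r =>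
              (a :: b :: rest).getD (2 * r + 2) 0 - (a :: b :: rest).getD (2 * r + 1) 0) := by
          apply List.map_congr_left
          intro r _
          simp only [Function.comp]
          have e1 : (2 * (r : Int) + 2) = ((2 * r + 2 : Nat) : Int) := by push_cast; ring
          have e2 : (2 * (r : Int) + 1) = ((2 * r + 1 : Nat) : Int) := by push_cast; ring
          rw [e1, e2, PySem.List.pyGetD_natCast, PySem.List.pyGetD_natCast]
        rw [hm2, gap_prod k rest a b hrest]
        simp
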